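-- pv_equiv track=rewrite | github.com/martinsah/pioneer_ir_decoder | decode_pronto_hex.py | timing_histogram
-- ===== SOURCE A (Python) =====
-- from collections import Counter
--
-- def timing_histogram(messages):
--     """
--     Creates a statistical histogram of unique timing values across all messages.
--
--     Args:
--         messages (list): A list of tuples from decode_pronto_hex, where each tuple is
--                         (timings_us, frequency) for one message.
--
--     Returns:
--         dict: A dictionary mapping timing values (in microseconds) to their occurrence counts.
--               Keys are timing values, values are counts. Sorted by timing value.
--     """
--     if not messages:
--         return {}
--
--     # Collect all timing values from all messages
--     all_timings = []
--     for timings_us, _ in messages: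
--         all_timings.extend(timings_us)
--
--     # Create histogram using Counter
--     histogram = Counter(all_timings)
--
--     # Return as sorted dictionary
--     return dict(sorted(histogram.items()))
-- ===== SOURCE B (Python) =====
-- def timing_histogram(messages):
--     """Histogram of timing values across all messages, keys in ascending order.
--
--     Instead of hash-counting with Counter and then sorting the keys, flatten,
--     sort the flattened list once, and emit each run of equal values with its
--     run length in a single two-pointer scan (the dict is built directly in
--     ascending key order).
--     """
--     if not messages:
--         return {}
--     s = sorted(t for timings_us, _ in messages for t in timings_us)
--     result = {}
--     i, n = 0, len(s)
--     while i < n: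
--         j = i
--         while j < n and s[j] == s[i]:
--             j += 1
--         result[s[i]] = j - i
--         i = j
--     return result
-- ===== Notes on version B (the rewrite author's own statement) =====
-- stated objective: alternative
-- what changed: Replaces Counter hash-counting followed by sorting the (key,count) items with sorting the flattened timing list once and emitting each run of equal values with its length in a single two-pointer scan, building the dict directly in ascending key order.
import Mathlib
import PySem

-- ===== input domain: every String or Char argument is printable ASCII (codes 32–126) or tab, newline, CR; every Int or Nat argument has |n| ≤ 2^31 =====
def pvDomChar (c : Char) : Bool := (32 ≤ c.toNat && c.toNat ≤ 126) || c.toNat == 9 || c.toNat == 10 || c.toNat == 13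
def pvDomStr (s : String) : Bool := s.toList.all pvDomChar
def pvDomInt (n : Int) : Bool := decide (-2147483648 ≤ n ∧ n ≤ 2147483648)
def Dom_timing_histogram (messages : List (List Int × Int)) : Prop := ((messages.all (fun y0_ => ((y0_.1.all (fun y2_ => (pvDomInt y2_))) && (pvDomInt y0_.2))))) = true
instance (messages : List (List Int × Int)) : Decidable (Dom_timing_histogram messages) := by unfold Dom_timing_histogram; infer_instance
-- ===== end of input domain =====

-- B replaces Counter-then-sort-items by sort-the-flattened-list-then-run-length-scan; alternative decomposition, same result.

-- ===== PORT A =====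
-- Counter then dict(sorted(histogram.items())): the resulting assoc list is the
-- items of the counter sorted by the (key, count) tuple (Python tuple order).
def timing_histogram (messages : List (List Int × Int)) : List (Int × Int) :=
  if messages = [] then []
  else
    let all_timings := messages.foldl (fun acc p => acc ++ p.1) ([] : List Int)
    let histogram := PySem.Dict.counter all_timings
    PySem.List.sorted2 histogram.items (fun p => p.1) (fun p => p.2) false

-- ===== PORT B =====
-- the two-pointer run-length scan of Source B: consume the run of values equal to the
-- head (inner while), emit (value, run length), continue after the run.
def pvRuns : List Int → List (Int × Int)
  | [] => []
  | x :: xs =>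
    (x, 1 + ((xs.takeWhile (fun y => y == x)).length : Int)) :: pvRuns (xs.dropWhile (fun y => y == x))
  termination_by l => l.length
  decreasing_by
    exact Nat.lt_succ_of_le (List.length_dropWhile_le _ _)

def timing_histogram_alt (messages : List (List Int × Int)) : List (Int × Int) :=
  if messages = [] then []
  else
    pvRuns (PySem.List.sorted (messages.flatMap (fun p => p.1)) (fun x => x) false)

-- ===== PRECONDITION & SPEC =====
def Spec_timing_histogram (messages : List (List Int × Int)) (out : List (Int × Int)) : Prop := out = timing_histogram_alt messages
instance (messages : List (List Int × Int)) (out : List (Int × Int)) : Decidable (Spec_timing_histogram messages out) := by unfold Spec_timing_histogram; infer_instance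

-- ===== CLAIM (what is proved, stated in full; the proofs are below) =====
def Claim_equal_timing_histogram : Prop := ∀ (messages : List (List Int × Int)), Dom_timing_histogram messages → Spec_timing_histogram messages (timing_histogram messages)

-- ===== LEMMAS AND PROOFS =====

theorem insertBy_perm {α : Type} (before : α → α → Bool) (x : α) (ys : List α) :
    (PySem.List.insertBy before x ys).Perm (x :: ys) := by
  induction ys with
  | nil => simp [PySem.List.insertBy]
  | cons y ys ih =>
    simp only [PySem.List.insertBy]
    split
    · exact List.Perm.refl _
    · exact (ih.cons y).trans (List.Perm.swap x y ys)

theorem insertBy_congr {α : Type} (f g : α → α → Bool) (x : α) (ys : List α)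
    (h : ∀ b ∈ ys, f x b = g x b) :
    PySem.List.insertBy f x ys = PySem.List.insertBy g x ys := by
  induction ys with
  | nil => rfl
  | cons y ys ih =>
    simp only [PySem.List.insertBy]
    rw [h y (List.mem_cons_self ..)]
    split
    · rfl
    · rw [ih (fun b hb => h b (List.mem_cons_of_mem _ hb))]

-- on pairs with pairwise-distinct first components, sorting by the tuple key
-- (fst, snd) is the same as sorting by fst alone
theorem foldl_insertBy_fst (L : List (Int × Int)) : ∀ (acc : List (Int × Int)),
    ((acc ++ L).map (fun p => p.1)).Nodup →
    L.foldl (fun acc x => PySem.List.insertBy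
        (fun a b => decide (a.1 < b.1) || (!decide (b.1 < a.1) && decide (a.2 < b.2))) x acc) acc
      = L.foldl (fun acc x => PySem.List.insertBy (fun a b => decide (a.1 < b.1)) x acc) acc := by
  induction L with
  | nil => intro acc _; rfl
  | cons x L ih =>
    intro acc h
    simp only [List.foldl_cons]
    have hne : ∀ b ∈ acc, b.1 ≠ x.1 := by
      intro b hb
      have hd := List.disjoint_of_nodup_append (by simpa using h)
      intro e
      exact hd (List.mem_map_of_mem hb)
        (by { rw [e]; exact List.mem_map_of_mem (List.mem_cons_self ..) })
    have hcong : PySem.List.insertBy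
        (fun a b : Int × Int => decide (a.1 < b.1) || (!decide (b.1 < a.1) && decide (a.2 < b.2))) x acc
        = PySem.List.insertBy (fun a b : Int × Int => decide (a.1 < b.1)) x acc := by
      apply insertBy_congr
      intro b hb
      have hne' : x.1 ≠ b.1 := fun e => hne b hb e.symm
      rcases lt_trichotomy x.1 b.1 with hlt | heq | hgt
      · simp [hlt]
      · exact absurd heq hne'
      · simp [hgt, not_lt_of_gt hgt]
    rw [hcong]
    apply ih
    have hperm : (PySem.List.insertBy (fun a b : Int × Int => decide (a.1 < b.1)) x acc ++ L).Perm
        (acc ++ x :: L) :=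
      (((insertBy_perm _ x acc).append_right L).trans (List.perm_middle).symm)
    exact ((hperm.map (fun p => p.1)).nodup_iff).mpr h

theorem sorted2_eq_sorted_fst (L : List (Int × Int)) (h : (L.map (fun p => p.1)).Nodup) :
    PySem.List.sorted2 L (fun p => p.1) (fun p => p.2) false
      = PySem.List.sorted L (fun p => p.1) false := by
  rw [PySem.List.sorted_eq_foldl_insertBy]
  have := foldl_insertBy_fst (L := L) (acc := []) (by simpa using h)
  simpa [PySem.List.sorted2] using this

-- elements of a sorted tail headed by something above x are all above x
theorem all_gt_of_sorted_head {x : Int} {d : List Int}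
    (hp : d.Pairwise (fun a b => a ≤ b)) (hx : ∀ y ∈ d.head?, x < y) :
    ∀ z ∈ d, x < z := by
  cases d with
  | nil => intro z hz; cases hz
  | cons y d =>
    intro z hz
    have hxy : x < y := hx y rfl
    rcases List.mem_cons.mp hz with rfl | hz
    · exact hxy
    · exact lt_of_lt_of_le hxy ((List.pairwise_cons.mp hp).1 z hz)

-- the head of a dropWhile result fails the predicate
theorem dropWhile_head_false {p : Int → Bool} : ∀ {l r : List Int} {y : Int},
    l.dropWhile p = y :: r → p y = false := by
  intro l
  induction l with
  | nil => intro r y h; simp [List.dropWhile] at h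
  | cons a l ih =>
    intro r y h
    by_cases hp : p a
    · rw [List.dropWhile_cons_of_pos hp] at h; exact ih h
    · rw [List.dropWhile_cons_of_neg hp] at h
      cases h; simpa using hp

-- run-length scan of a sorted list: keys strictly increase, every key of the
-- input appears, and the second component is the count in the scanned list
theorem pvRuns_spec (s : List Int) (hs : s.Pairwise (fun a b => a ≤ b)) :
    ((pvRuns s).map (fun p => p.1)).Pairwise (fun a b => a < b) ∧
    (∀ k : Int, k ∈ (pvRuns s).map (fun p => p.1) ↔ k ∈ s) ∧
    pvRuns s = ((pvRuns s).map (fun p => p.1)).map (fun k => (k, (s.count k : Int))) := by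
  induction s using pvRuns.induct with
  | case1 => exact ⟨by simp [pvRuns], fun k => by simp [pvRuns], by simp [pvRuns]⟩
  | case2 x xs =>
    rename_i ih
    set t := xs.takeWhile (fun y => y == x) with ht
    set d := xs.dropWhile (fun y => y == x) with hd
    have hxs : xs.Pairwise (fun a b => a ≤ b) := (List.pairwise_cons.mp hs).2
    have hxle : ∀ y ∈ xs, x ≤ y := (List.pairwise_cons.mp hs).1
    have hdsub : List.Sublist d xs := by rw [hd]; exact List.dropWhile_sublist _
    have hdp : d.Pairwise (fun a b => a ≤ b) := hxs.sublist hdsub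
    have htd : t ++ d = xs := by rw [ht, hd]; exact List.takeWhile_append_dropWhile ..
    have htx : ∀ y ∈ t, y = x := by
      intro y hy
      have := List.mem_takeWhile_imp hy
      simpa using this
    have hgt : ∀ z ∈ d, x < z := by
      apply all_gt_of_sorted_head hdp
      intro y hy
      cases hdd : d with
      | nil => rw [hdd] at hy; simp at hy
      | cons y0 r =>
        rw [hdd] at hy; simp at hy; subst hy
        have hne : (y0 == x) = false := dropWhile_head_false (p := fun y => y == x) (hd.symm.trans hdd)
        have hmem : y0 ∈ xs := hdsub.mem (by rw [hdd]; exact List.mem_cons_self ..)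
        exact lt_of_le_of_ne (hxle _ hmem) (fun e => by simp [e.symm] at hne)
    obtain ⟨ihp, ihm, ihe⟩ := ih hdp
    have hrun : pvRuns (x :: xs) = (x, 1 + ((t.length : Nat) : Int)) :: pvRuns d := by
      rw [pvRuns]
    have hxnd : x ∉ d := fun hx => lt_irrefl x (hgt x hx)
    have hkd : ∀ k ∈ (pvRuns d).map (fun p => p.1), x < k := by
      intro k hk; exact hgt k ((ihm k).mp hk)
    refine ⟨?_, ?_, ?_⟩
    · rw [hrun]
      simp only [List.map_cons]
      exact List.pairwise_cons.mpr ⟨hkd, ihp⟩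
    · intro k
      rw [hrun]
      simp only [List.map_cons, List.mem_cons]
      rw [ihm k]
      constructor
      · rintro (rfl | hk)
        · exact Or.inl rfl
        · exact Or.inr (htd ▸ List.mem_append_right t hk)
      · intro hk
        rcases hk with rfl | hk
        · exact Or.inl rfl
        · rw [← htd] at hk
          rcases List.mem_append.mp hk with hk | hk
          · exact Or.inl (htx k hk)
          · exact Or.inr hk
    · rw [hrun]
      simp only [List.map_cons]
      have hcx : (x :: xs).count x = 1 + t.length := by
        rw [← htd, List.count_cons_self, List.count_append]
        have h1 : t.count x = t.length := List.count_eq_length.mpr (fun y hy => by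
          simp [htx y hy])
        have h2 : d.count x = 0 := List.count_eq_zero.mpr hxnd
        omega
      have hcnt : ∀ k ∈ (pvRuns d).map (fun p => p.1),
          (k, ((d.count k : Nat) : Int)) = (k, (((x :: xs).count k : Nat) : Int)) := by
        intro k hk
        have hxk : x < k := hkd k hk
        have h1 : (x :: xs).count k = d.count k := by
          rw [← htd, List.count_cons_of_ne (by intro e; exact absurd (e ▸ hxk) (lt_irrefl x)),
            List.count_append]
          have h2 : t.count k = 0 := List.count_eq_zero.mpr (fun hkt =>
            absurd ((htx k hkt) ▸ hxk) (lt_irrefl x))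
          omega
        rw [h1]
      congr 1
      · rw [hcx]; push_cast; ring_nf
      · calc pvRuns d = ((pvRuns d).map (fun p => p.1)).map (fun k => (k, ((d.count k : Nat) : Int))) := ihe
          _ = ((pvRuns d).map (fun p => p.1)).map (fun k => (k, (((x :: xs).count k : Nat) : Int))) :=
              List.map_congr_left hcnt

theorem main_eq (all : List Int) :
    PySem.List.sorted2 (PySem.Dict.counter all).items (fun p => p.1) (fun p => p.2) false
      = pvRuns (PySem.List.sorted all (fun x => x) false) := by
  set s := PySem.List.sorted all (fun x => x) false with hsdef
  have hsp : s.Pairwise (fun a b => a ≤ b) := by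
    simpa using PySem.List.sorted_pairwise all (fun x => x)
  have hperm : s.Perm all := PySem.List.sorted_perm ..
  obtain ⟨hp1, hp2, hp3⟩ := pvRuns_spec s hsp
  set K := (pvRuns s).map (fun p => p.1) with hK
  rw [PySem.Dict.items_counter]
  rw [sorted2_eq_sorted_fst _ (by
    rw [List.map_map]
    have : ((fun p : Int × Int => p.1) ∘ (fun k => (k, (all.count k : Int)))) = id := rfl
    rw [this, List.map_id]
    exact PySem.Set.nodup_ofList all)]
  apply PySem.List.sorted_eq_of_perm_of_pairwise_lt
  · -- pvRuns s is a permutation of the mapped ofList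
    have hKnd : K.Nodup := hp1.imp (fun h => ne_of_lt h)
    have hKS : K.Perm (PySem.Set.ofList all) := by
      apply (List.perm_ext_iff_of_nodup hKnd (PySem.Set.nodup_ofList all)).mpr
      intro k
      rw [hp2 k, PySem.Set.mem_ofList]
      exact ⟨fun h => hperm.mem_iff.mp h, fun h => hperm.mem_iff.mpr h⟩
    have hcnt : (fun k : Int => (k, (s.count k : Int))) = (fun k => (k, (all.count k : Int))) := by
      funext k
      rw [hperm.count_eq]
    rw [hp3, hcnt]
    exact hKS.map _
  · exact List.pairwise_map.mp hp1

-- ===== VERDICT (by name: the statement is the Claim_ definition above) =====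
theorem timing_histogram_spec : Claim_equal_timing_histogram := by
  intro messages _
  unfold Spec_timing_histogram timing_histogram timing_histogram_alt
  split
  · rfl
  · rw [PySem.List.foldl_append_eq_flatMap, List.nil_append]
    exact main_eq _
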